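-- pv_equiv track=rewrite | github.com/hoonsdev/algorithm | 백준/Gold/1195. 킥다운/킥다운.py | move_gears
-- ===== SOURCE A (Python) =====
-- def move_gears(upper, lower):
--     temp1 = upper[:]
--     temp2 = lower[:]
--
--     while len(temp1) <= len(upper) + len(lower):
--         fit = True
--         for i in range(min(len(temp1), len(temp2))):
--             if temp1[i] == 2 and temp2[i] == 2:
--                 temp1.insert(0, 0)  # temp1에 0을 앞에 삽입
--                 fit = False
--                 break
--         if fit:
--             break
--
--     return max(len(temp1), len(lower))
-- ===== SOURCE B (Python) =====
-- def move_gears(upper, lower):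
--     ups = [i for i, v in enumerate(upper) if v == 2]
--     los = [j for j, v in enumerate(lower) if v == 2]
--     bad = {l - u for u in ups for l in los if l >= u}
--     s = 0
--     while s in bad:
--         s += 1
--     return max(len(upper) + s, len(lower))
-- ===== Notes on version B (the rewrite author's own statement) =====
-- stated objective: alternative
-- what changed: Instead of A's simulation that repeatedly inserts a zero and rescans the shifted list, B collects the positions of the 2s once, builds the set of forbidden shifts {l-u} from all position pairs, and returns the minimum excludant of that set.
import Mathlib
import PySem

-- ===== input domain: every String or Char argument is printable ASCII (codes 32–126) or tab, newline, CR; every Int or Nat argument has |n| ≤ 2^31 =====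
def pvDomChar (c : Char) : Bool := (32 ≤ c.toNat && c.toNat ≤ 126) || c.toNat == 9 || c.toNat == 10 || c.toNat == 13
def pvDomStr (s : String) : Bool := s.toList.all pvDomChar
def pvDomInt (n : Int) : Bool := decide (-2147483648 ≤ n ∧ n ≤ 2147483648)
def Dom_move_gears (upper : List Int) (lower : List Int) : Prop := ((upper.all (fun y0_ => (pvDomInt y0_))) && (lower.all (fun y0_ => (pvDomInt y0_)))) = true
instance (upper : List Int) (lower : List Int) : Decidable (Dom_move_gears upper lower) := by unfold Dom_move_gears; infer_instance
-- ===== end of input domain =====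

-- B drops A's simulation of the shifting entirely: it collects the '2' positions of
-- each gear once, forms the finite set of FORBIDDEN shifts {l - u} from the position
-- pairs, and returns the minimum excludant of that set (objective: alternative).

-- ===== PORT A =====
-- inner `for i in range(min(len(temp1), len(temp2)))` with break at the first collision:
-- `any` stops at the first i with temp1[i]==2 and temp2[i]==2 (the loop's only effect
-- besides the break is the single insert, performed by the caller when this returns true)
def pvInnerA (t1 t2 : List Int) : Bool :=
  (List.range (min t1.length t2.length)).any (fun i => t1.getD i 0 == 2 && t2.getD i 0 == 2)

-- the `while len(temp1) <= len(upper) + len(lower)` loop mutating temp1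
def pvLoopA (upper lower t1 : List Int) : List Int :=
  if _h : t1.length ≤ upper.length + lower.length then
    if pvInnerA t1 lower then pvLoopA upper lower (0 :: t1) else t1
  else t1
termination_by upper.length + lower.length + 1 - t1.length
decreasing_by simp_all; omega

def move_gears (upper : List Int) (lower : List Int) : Int :=
  ((max (pvLoopA upper lower upper).length lower.length : Nat) : Int)

-- ===== PORT B =====
-- `[i for i, v in enumerate(l) if v == 2]`
def pvPos2 (l : List Int) : List Int :=
  ((PySem.List.enumerate l).filter (fun p => p.2 == 2)).map (fun p => p.1)

-- `{l - u for u in ups for l in los if l >= u}` (a set comprehension, as PySem.Set)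
def pvBad (ups los : List Int) : PySem.Set Int :=
  PySem.Set.ofList (ups.flatMap (fun u => (los.filter (fun l => u ≤ l)).map (fun l => l - u)))

-- `while s in bad: s += 1` (fuel bounds the loop; since every element of bad is below
-- len(lower), fuel len(lower)+1 always suffices and the Lean loop matches Python's)
def pvMex (bad : List Int) (s : Nat) : Nat → Nat
  | 0 => s
  | fuel + 1 => if (s : Int) ∈ bad then pvMex bad (s + 1) fuel else s

def move_gears_alt (upper : List Int) (lower : List Int) : Int :=
  let ups := pvPos2 upper
  let los := pvPos2 lower
  let bad := pvBad ups los
  let s := pvMex bad 0 (lower.length + 1)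
  ((max (upper.length + s) lower.length : Nat) : Int)

-- ===== PRECONDITION & SPEC =====
def Spec_move_gears (upper : List Int) (lower : List Int) (out : Int) : Prop := out = move_gears_alt upper lower
instance (upper : List Int) (lower : List Int) (out : Int) : Decidable (Spec_move_gears upper lower out) := by unfold Spec_move_gears; infer_instance

-- ===== CLAIM (what is proved, stated in full; the proofs are below) =====
def Claim_equal_move_gears : Prop := ∀ (upper : List Int) (lower : List Int), Dom_move_gears upper lower → Spec_move_gears upper lower (move_gears upper lower)

-- ===== LEMMAS AND PROOFS =====

theorem getD_big {l : List Int} {k : Nat} (h : l.length ≤ k) : l.getD k 0 = 0 :=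
  List.getD_eq_default _ _ h

theorem getD_replicate_append (u : List Int) : ∀ (s i : Nat),
    (List.replicate s 0 ++ u).getD i 0 = if i < s then 0 else u.getD (i - s) 0 := by
  intro s
  induction s with
  | zero => intro i; simp
  | succ n ih =>
    intro i
    cases i with
    | zero => simp [List.replicate_succ]
    | succ i =>
      rw [List.replicate_succ, List.cons_append, List.getD_cons_succ, ih]
      simp [Nat.succ_sub_succ]

-- membership in the position list: exactly the indices holding a 2
theorem mem_pvPos2 (l : List Int) (x : Int) :
    x ∈ pvPos2 l ↔ ∃ k : Nat, k < l.length ∧ x = (k : Int) ∧ l.getD k 0 = 2 := by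
  simp only [pvPos2, List.mem_map, List.mem_filter, PySem.List.mem_enumerate_iff]
  constructor
  · rintro ⟨⟨i, v⟩, ⟨⟨k, hk, hp⟩, hv⟩, hx⟩
    cases hp
    refine ⟨k, hk, by simpa using hx.symm, ?_⟩
    simp only [beq_iff_eq] at hv
    simp [List.getD_eq_getElem?_getD, List.getElem?_eq_getElem hk, hv]
  · rintro ⟨k, hk, hx, h2⟩
    refine ⟨((k : Int), l[k]), ⟨⟨k, hk, by simp⟩, ?_⟩, by simpa using hx.symm⟩
    simp only [beq_iff_eq]
    rw [List.getD_eq_getElem?_getD, List.getElem?_eq_getElem hk] at h2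
    simpa using h2

-- the loop conditions agree: A's rescan over the shifted temp1 ↔ s being a forbidden shift
theorem cond_eq (upper lower : List Int) (s : Nat) :
    pvInnerA (List.replicate s 0 ++ upper) lower
      = decide ((s : Int) ∈ pvBad (pvPos2 upper) (pvPos2 lower)) := by
  rw [Bool.eq_iff_iff]
  simp only [pvBad, PySem.Set.mem_ofList, List.mem_flatMap, List.mem_map, List.mem_filter,
    decide_eq_true_eq, pvInnerA, List.any_eq_true, List.mem_range, Bool.and_eq_true, beq_iff_eq]
  constructor
  · rintro ⟨i, hi, h1, h2⟩
    rw [getD_replicate_append] at h1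
    by_cases his : i < s
    · rw [if_pos his] at h1; norm_num at h1
    · rw [if_neg his] at h1
      have hus : i - s < upper.length := by
        by_contra h; rw [getD_big (by omega)] at h1; norm_num at h1
      have hls : i < lower.length := by simp at hi; omega
      refine ⟨((i - s : Nat) : Int), (mem_pvPos2 _ _).2 ⟨i - s, hus, rfl, h1⟩,
              ⟨(i : Nat), ⟨(mem_pvPos2 _ _).2 ⟨i, hls, rfl, h2⟩, by omega⟩, by omega⟩⟩
  · rintro ⟨u, hu, l, ⟨hl, hul⟩, hs⟩
    obtain ⟨ku, hku, rfl, h1⟩ := (mem_pvPos2 _ _).1 hu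
    obtain ⟨kl, hkl, rfl, h2⟩ := (mem_pvPos2 _ _).1 hl
    have hks : kl = ku + s := by omega
    refine ⟨kl, by simp; omega, ?_, h2⟩
    rw [getD_replicate_append, if_neg (by omega)]
    have : kl - s = ku := by omega
    rw [this]; exact h1

-- the two computations march through the candidate shifts in lockstep
theorem loop_eq (upper lower : List Int) : ∀ (f s : Nat), s + f = lower.length + 1 →
    (pvLoopA upper lower (List.replicate s 0 ++ upper)).length
      = upper.length + pvMex (pvBad (pvPos2 upper) (pvPos2 lower)) s f := by
  intro f
  induction f with
  | zero =>
    intro s hs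
    rw [pvLoopA, pvMex]
    have hg : ¬ (List.replicate s 0 ++ upper).length ≤ upper.length + lower.length := by
      simp; omega
    rw [dif_neg hg]
    simp; omega
  | succ f ih =>
    intro s hs
    rw [pvLoopA, pvMex]
    have hg : (List.replicate s 0 ++ upper).length ≤ upper.length + lower.length := by
      simp; omega
    rw [dif_pos hg, cond_eq]
    by_cases hc : (s : Int) ∈ pvBad (pvPos2 upper) (pvPos2 lower)
    · rw [if_pos (by simp [hc]), if_pos hc]
      have hrep : (0 : Int) :: (List.replicate s 0 ++ upper) = List.replicate (s + 1) 0 ++ upper := by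
        rw [List.replicate_succ]; rfl
      rw [hrep, ih (s + 1) (by omega)]
    · rw [if_neg (by simp [hc]), if_neg hc]
      simp; omega

-- ===== VERDICT (by name: the statement is the Claim_ definition above) =====
theorem move_gears_spec : Claim_equal_move_gears := by
  intro upper lower _
  unfold Spec_move_gears move_gears move_gears_alt
  have h := loop_eq upper lower (lower.length + 1) 0 (by omega)
  simp only [List.replicate_zero, List.nil_append] at h
  rw [h]
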